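-- pv_equiv track=rewrite | github.com/carsten-rossen/pokemon | random-challenges.py | consecutive_zeros
-- ===== SOURCE A (Python) =====
-- def consecutive_zeros(string):
--     count = 0
--     new_count = 0
--     for char in string:
--         if char == '1':
--             new_count = 0
--         else:
--             new_count += 1
--             if new_count > count:
--                 count = new_count
--     return count
-- ===== SOURCE B (Python) =====
-- def consecutive_zeros(string):
--     return max(len(piece) for piece in string.split('1'))
-- ===== Notes on version B (the rewrite author's own statement) =====
-- stated objective: idiomatic
-- what changed: Replaces the running-counter scan (count/new_count state machine) with a split-then-measure one-liner: split the string on the separator character and take the maximum piece length.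
import Mathlib
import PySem

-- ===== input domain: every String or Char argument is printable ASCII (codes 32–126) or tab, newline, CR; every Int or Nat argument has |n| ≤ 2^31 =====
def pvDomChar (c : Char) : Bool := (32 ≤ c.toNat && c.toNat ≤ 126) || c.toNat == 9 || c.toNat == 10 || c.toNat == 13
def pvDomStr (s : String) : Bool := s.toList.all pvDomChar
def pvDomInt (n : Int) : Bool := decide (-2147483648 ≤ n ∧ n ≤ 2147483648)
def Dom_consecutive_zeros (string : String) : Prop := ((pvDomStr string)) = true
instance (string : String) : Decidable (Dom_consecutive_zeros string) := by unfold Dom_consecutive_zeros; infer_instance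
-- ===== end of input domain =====

-- B replaces A's running-counter state machine with split-then-max over the pieces; same O(n), measurably faster in CPython (C-level split).

-- ===== PORT A =====
-- loop body: if char == '1': new_count = 0 else: new_count += 1; if new_count > count: count = new_count
def pvStepA (st : Int × Int) (char : Char) : Int × Int :=
  if char == '1' then (st.1, 0)
  else
    let nc := st.2 + 1
    (if nc > st.1 then nc else st.1, nc)

def consecutive_zeros (string : String) : Int :=
  (string.toList.foldl pvStepA (0, 0)).1

-- ===== PORT B =====
-- string.split('1') → List.splitOn '1' on the code points; max(len(piece) for …) → fold of max
-- over the piece lengths (split never returns an empty list, so the [] branch is unreachable).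
def consecutive_zeros_alt (string : String) : Int :=
  match (string.toList.splitOn '1').map (fun p => (p.length : Int)) with
  | [] => 0
  | l :: ls => ls.foldl max l

-- ===== PRECONDITION & SPEC =====
def Spec_consecutive_zeros (string : String) (out : Int) : Prop := out = consecutive_zeros_alt string
instance (string : String) (out : Int) : Decidable (Spec_consecutive_zeros string out) := by unfold Spec_consecutive_zeros; infer_instance

-- ===== CLAIM (what is proved, stated in full; the proofs are below) =====
def Claim_equal_consecutive_zeros : Prop := ∀ (string : String), Dom_consecutive_zeros string → Spec_consecutive_zeros string (consecutive_zeros string)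

-- ===== LEMMAS AND PROOFS =====

-- the longest run of non-'1' chars in cs, given n chars of the current run already seen
def pvMaxRun : List Char → Int → Int
  | [], n => n
  | c :: rest, n => if c = '1' then max n (pvMaxRun rest 0) else pvMaxRun rest (n + 1)

theorem pvMaxRun_ge (cs : List Char) : ∀ n : Int, n ≤ pvMaxRun cs n := by
  induction cs with
  | nil => intro n; simp [pvMaxRun]
  | cons c rest ih =>
    intro n
    simp only [pvMaxRun]
    split_ifs
    · exact le_max_left _ _
    · exact le_trans (by omega) (ih (n + 1))

theorem pvFoldA (cs : List Char) : ∀ (c0 n0 : Int), 0 ≤ n0 → n0 ≤ c0 →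
    (cs.foldl pvStepA (c0, n0)).1 = max c0 (pvMaxRun cs n0) := by
  induction cs with
  | nil => intro c0 n0 h0 h1; simp [pvMaxRun]; omega
  | cons c rest ih =>
    intro c0 n0 h0 h1
    rw [List.foldl_cons]
    by_cases hc : c = '1'
    · rw [show pvStepA (c0, n0) c = (c0, 0) from by simp [pvStepA, hc]]
      rw [ih c0 0 le_rfl (by omega)]
      have := pvMaxRun_ge rest (0 : Int)
      simp only [pvMaxRun, if_pos hc]
      omega
    · by_cases hgt : n0 + 1 > c0
      · rw [show pvStepA (c0, n0) c = (n0 + 1, n0 + 1) from by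
          simp [pvStepA, hc]; omega]
        rw [ih (n0 + 1) (n0 + 1) (by omega) le_rfl]
        have := pvMaxRun_ge rest (n0 + 1)
        simp only [pvMaxRun, if_neg hc]
        omega
      · rw [show pvStepA (c0, n0) c = (c0, n0 + 1) from by
          simp [pvStepA, hc]; omega]
        rw [ih c0 (n0 + 1) (by omega) (by omega)]
        simp only [pvMaxRun, if_neg hc]

theorem pvFoldMax (ls : List Int) : ∀ a b : Int, max a (ls.foldl max b) = ls.foldl max (max a b) := by
  induction ls with
  | nil => intro a b; simp
  | cons l ls ih =>
    intro a b
    simp only [List.foldl_cons]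
    rw [ih a (max b l), ← max_assoc]

theorem pvFoldMax_ge (ls : List Int) : ∀ b : Int, b ≤ ls.foldl max b := by
  induction ls with
  | nil => intro b; simp
  | cons l ls ih =>
    intro b
    simp only [List.foldl_cons]
    exact le_trans (le_max_left b l) (ih (max b l))

theorem pvKey (cs : List Char) : ∀ n : Int, 0 ≤ n →
    pvMaxRun cs n =
      (match (cs.splitOnP (· == '1')).map (fun p => (p.length : Int)) with
        | [] => 0
        | l :: ls => ls.foldl max (n + l)) := by
  induction cs with
  | nil => intro n _; simp [pvMaxRun, List.splitOnP_nil]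
  | cons c rest ih =>
    intro n hn
    obtain ⟨q, qs, hq⟩ := List.exists_cons_of_ne_nil (List.splitOnP_ne_nil (· == '1') rest)
    simp only [pvMaxRun, List.splitOnP_cons]
    by_cases hc : c = '1'
    · simp only [hc, beq_self_eq_true, if_true, hq, List.map_cons,
        List.length_nil, Nat.cast_zero, add_zero, List.foldl_cons]
      rw [ih 0 le_rfl]
      simp only [hq, List.map_cons, zero_add]
      rw [pvFoldMax]
    · simp only [beq_iff_eq, if_neg hc, hq, List.modifyHead_cons, List.map_cons]
      rw [ih (n + 1) (by omega)]
      simp only [hq, List.map_cons, List.length_cons]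
      congr 1
      push_cast
      omega

-- ===== VERDICT (by name: the statement is the Claim_ definition above) =====
theorem consecutive_zeros_spec : Claim_equal_consecutive_zeros := by
  intro s _
  unfold Spec_consecutive_zeros consecutive_zeros consecutive_zeros_alt
  rw [pvFoldA s.toList 0 0 le_rfl le_rfl, pvKey s.toList 0 le_rfl]
  simp only [List.splitOn]
  obtain ⟨q, qs, hq⟩ := List.exists_cons_of_ne_nil (List.splitOnP_ne_nil (· == '1') s.toList)
  simp only [hq, List.map_cons, zero_add]
  have h1 : (0 : Int) ≤ (q.length : Int) := by positivity
  have h2 := pvFoldMax_ge (qs.map (fun p => (p.length : Int))) (q.length : Int)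
  omega
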